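-- pv_equiv track=rewrite | github.com/Adityalingwal/AI-brand-tracker | src/prompt_generator/generator.py | _generate_fallback
-- ===== SOURCE A (Python) =====
-- def _generate_fallback(category: str, count: int) -> list[str]:
--     """Generate fallback prompts without LLM."""
--     templates = [
--         f"What are the best {category} available today?",
--         f"Which {category} offers the most features for the price?",
--         f"Compare the top rated {category} options",
--         f"What is the most affordable {category}?",
--         f"Best {category} for small businesses",
--         f"Best {category} for startups",
--         f"Best {category} for enterprise companies",
--         f"Which {category} has the best customer support?",
--         f"What are alternatives to popular {category}?",
--         f"What do users say about {category} in 2025?",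
--         f"Which {category} is easiest to use?",
--         f"Best {category} with free trial",
--         f"Top rated {category} according to reviews",
--         f"Which {category} integrates with other tools?",
--         f"Most recommended {category} by experts",
--     ]
--
--     # Return requested number of templates
--     result = []
--     for i in range(count):
--         result.append(templates[i % len(templates)])
--     return result
-- ===== SOURCE B (Python) =====
-- _PARTS = [
--     ("What are the best ", " available today?"),
--     ("Which ", " offers the most features for the price?"),
--     ("Compare the top rated ", " options"),
--     ("What is the most affordable ", "?"),
--     ("Best ", " for small businesses"),
--     ("Best ", " for startups"),
--     ("Best ", " for enterprise companies"),
--     ("Which ", " has the best customer support?"),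
--     ("What are alternatives to popular ", "?"),
--     ("What do users say about ", " in 2025?"),
--     ("Which ", " is easiest to use?"),
--     ("Best ", " with free trial"),
--     ("Top rated ", " according to reviews"),
--     ("Which ", " integrates with other tools?"),
--     ("Most recommended ", " by experts"),
-- ]
--
-- def _generate_fallback(category: str, count: int) -> list[str]:
--     """Generate fallback prompts without LLM."""
--     block = [pre + category + suf for pre, suf in _PARTS]
--     q, r = divmod(count, len(block)) if count > 0 else (0, 0)
--     return block * q + block[:r]
-- ===== Notes on version B (the rewrite author's own statement) =====
-- stated objective: alternative
-- what changed: B stores the 15 prompts as a (prefix, suffix) pair table, renders each as prefix+category+suffix once, and builds the result as divmod-determined full blocks plus a prefix slice (block*q + block[:r]) instead of A's per-index modulo loop over f-string templates.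
import Mathlib
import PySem

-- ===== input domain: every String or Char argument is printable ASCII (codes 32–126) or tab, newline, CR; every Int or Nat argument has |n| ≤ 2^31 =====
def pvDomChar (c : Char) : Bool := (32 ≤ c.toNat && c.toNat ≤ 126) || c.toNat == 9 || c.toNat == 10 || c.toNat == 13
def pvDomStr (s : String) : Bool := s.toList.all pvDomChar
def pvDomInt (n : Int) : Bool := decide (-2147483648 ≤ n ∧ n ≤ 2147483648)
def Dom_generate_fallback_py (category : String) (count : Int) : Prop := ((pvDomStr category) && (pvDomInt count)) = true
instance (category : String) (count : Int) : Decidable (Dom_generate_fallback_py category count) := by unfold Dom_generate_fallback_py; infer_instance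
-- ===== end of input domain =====

-- B keeps the prompts as a (prefix, suffix) pair table and builds the answer as divmod full blocks + a prefix slice, instead of A's per-index modulo loop (objective: alternative decomposition, same cost).

-- ===== PORT A =====
-- templates built inline by f-strings; for i in range(count): result.append(templates[i % len(templates)])
-- templates[i % len(templates)] never raises (0 ≤ i % 15 < 15), so pyGetD with default "" is exact.
def generate_fallback_py (category : String) (count : Int) : List String :=
  let templates : List String :=
    [ "What are the best " ++ category ++ " available today?",
      "Which " ++ category ++ " offers the most features for the price?",
      "Compare the top rated " ++ category ++ " options",
      "What is the most affordable " ++ category ++ "?",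
      "Best " ++ category ++ " for small businesses",
      "Best " ++ category ++ " for startups",
      "Best " ++ category ++ " for enterprise companies",
      "Which " ++ category ++ " has the best customer support?",
      "What are alternatives to popular " ++ category ++ "?",
      "What do users say about " ++ category ++ " in 2025?",
      "Which " ++ category ++ " is easiest to use?",
      "Best " ++ category ++ " with free trial",
      "Top rated " ++ category ++ " according to reviews",
      "Which " ++ category ++ " integrates with other tools?",
      "Most recommended " ++ category ++ " by experts" ]
  (PySem.List.pyRange 0 count 1).foldl
    (fun result i =>
      result ++ [PySem.List.pyGetD templates (PySem.Int.mod i (PySem.List.len templates)) ""])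
    []

-- ===== PORT B =====
-- module-level pair table _PARTS
def fallback_parts : List (String × String) :=
  [ ("What are the best ", " available today?"),
    ("Which ", " offers the most features for the price?"),
    ("Compare the top rated ", " options"),
    ("What is the most affordable ", "?"),
    ("Best ", " for small businesses"),
    ("Best ", " for startups"),
    ("Best ", " for enterprise companies"),
    ("Which ", " has the best customer support?"),
    ("What are alternatives to popular ", "?"),
    ("What do users say about ", " in 2025?"),
    ("Which ", " is easiest to use?"),
    ("Best ", " with free trial"),
    ("Top rated ", " according to reviews"),
    ("Which ", " integrates with other tools?"),
    ("Most recommended ", " by experts") ]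

-- block = [pre + category + suf for pre, suf in _PARTS]
-- q, r = divmod(count, len(block)) if count > 0 else (0, 0); return block * q + block[:r]
-- 'block * q' is flatten (replicate q.toNat block) (q ≥ 0 under the guard); block[:r] with 0 ≤ r is take r.toNat.
def generate_fallback_py_alt (category : String) (count : Int) : List String :=
  let block := fallback_parts.map (fun p => p.1 ++ category ++ p.2)
  let qr : Int × Int :=
    if 0 < count then
      (PySem.Int.floordiv count (PySem.List.len block), PySem.Int.mod count (PySem.List.len block))
    else (0, 0)
  List.flatten (List.replicate qr.1.toNat block) ++ block.take qr.2.toNat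

-- ===== PRECONDITION & SPEC =====
def Spec_generate_fallback_py (category : String) (count : Int) (out : List String) : Prop := out = generate_fallback_py_alt category count
instance (category : String) (count : Int) (out : List String) : Decidable (Spec_generate_fallback_py category count out) := by unfold Spec_generate_fallback_py; infer_instance

-- ===== CLAIM (what is proved, stated in full; the proofs are below) =====
def Claim_equal_generate_fallback_py : Prop := ∀ (category : String) (count : Int), Dom_generate_fallback_py category count → Spec_generate_fallback_py category count (generate_fallback_py category count)


-- ===== LEMMAS AND PROOFS =====

-- proof-only helper: the rendered 15 prompts (A's inline list and B's rendered pair table both reduce to it)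
def tmplList (category : String) : List String :=
  [ "What are the best " ++ category ++ " available today?",
    "Which " ++ category ++ " offers the most features for the price?",
    "Compare the top rated " ++ category ++ " options",
    "What is the most affordable " ++ category ++ "?",
    "Best " ++ category ++ " for small businesses",
    "Best " ++ category ++ " for startups",
    "Best " ++ category ++ " for enterprise companies",
    "Which " ++ category ++ " has the best customer support?",
    "What are alternatives to popular " ++ category ++ "?",
    "What do users say about " ++ category ++ " in 2025?",
    "Which " ++ category ++ " is easiest to use?",
    "Best " ++ category ++ " with free trial",
    "Top rated " ++ category ++ " according to reviews",
    "Which " ++ category ++ " integrates with other tools?",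
    "Most recommended " ++ category ++ " by experts" ]

lemma portA_eq (category : String) (count : Int) :
    generate_fallback_py category count =
      (PySem.List.pyRange 0 count 1).foldl
        (fun result i =>
          result ++ [PySem.List.pyGetD (tmplList category)
            (PySem.Int.mod i (PySem.List.len (tmplList category))) ""]) [] := rfl

lemma portB_eq (category : String) (count : Int) :
    generate_fallback_py_alt category count =
      (let qr : Int × Int :=
        if 0 < count then
          (PySem.Int.floordiv count (PySem.List.len (tmplList category)),
           PySem.Int.mod count (PySem.List.len (tmplList category)))
        else (0, 0)
       List.flatten (List.replicate qr.1.toNat (tmplList category)) ++ (tmplList category).take qr.2.toNat) := rfl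

-- k-th element of xs * r is xs[k % len xs]
lemma getElem?_flatten_replicate {α : Type} (xs : List α) (r k : Nat)
    (hk : k < xs.length * r) :
    (List.flatten (List.replicate r xs))[k]? = xs[k % xs.length]? := by
  induction r generalizing k with
  | zero => simp at hk
  | succ r ih =>
    rw [Nat.mul_succ] at hk
    have hx : 0 < xs.length := by
      by_contra h
      simp [Nat.le_zero.mp (Nat.not_lt.mp h)] at hk
    rw [List.replicate_succ, List.flatten_cons]
    by_cases hkx : k < xs.length
    · rw [List.getElem?_append_left hkx, Nat.mod_eq_of_lt hkx]
    · have hkx' : xs.length ≤ k := Nat.not_lt.mp hkx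
      rw [List.getElem?_append_right hkx']
      have := ih (k - xs.length) (by omega)
      rw [this, Nat.mod_eq_sub_mod hkx']

-- ===== VERDICT (by name: the statement is the Claim_ definition above) =====
theorem generate_fallback_py_spec : Claim_equal_generate_fallback_py := by
  intro category count _
  unfold Spec_generate_fallback_py
  rw [portA_eq, portB_eq]
  set tmpl := tmplList category with htm
  have hlen : tmpl.length = 15 := by simp [htm, tmplList]
  simp only [PySem.List.len_eq, hlen, Nat.cast_ofNat]
  by_cases hc : 0 < count
  · rw [if_pos hc]
    set q := PySem.Int.floordiv count 15 with hq
    set r := PySem.Int.mod count 15 with hrr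
    have hid : q * 15 + r = count := PySem.Int.floordiv_mul_add_mod count 15
    have hr0 : 0 ≤ r := PySem.Int.mod_nonneg count (b := 15) (by omega)
    have hr15 : r < 15 := PySem.Int.mod_lt count (b := 15) (by omega)
    have hq0 : 0 ≤ q := by omega
    -- A side: fold → map over range
    rw [PySem.List.foldl_append_singleton_eq_map, PySem.List.pyRange_one]
    simp only [List.nil_append, Int.sub_zero, List.map_map]
    set n := count.toNat with hn
    have hsplit : n = 15 * q.toNat + r.toNat := by omega
    apply List.ext_getElem?
    intro k
    by_cases hkn : k < n
    · -- A[k]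
      have hkmod : k % 15 < tmpl.length := by rw [hlen]; exact Nat.mod_lt k (by omega)
      rw [List.getElem?_map, List.getElem?_range hkn]
      simp only [Option.map_some, Function.comp_apply, Int.zero_add]
      have hmod : PySem.Int.mod ((k : Int)) 15 = ((k % 15 : Nat) : Int) := by
        exact_mod_cast PySem.Int.mod_natCast k 15
      rw [hmod, PySem.List.pyGetD_natCast]
      -- B[k]
      have hflat : (List.flatten (List.replicate q.toNat tmpl)).length = 15 * q.toNat := by
        simp [hlen]; ring
      by_cases hkq : k < 15 * q.toNat
      · rw [List.getElem?_append_left (by rw [hflat]; omega : k < (List.flatten (List.replicate q.toNat tmpl)).length)]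
        rw [getElem?_flatten_replicate tmpl q.toNat k (by rw [hlen]; omega), hlen]
        simp [List.getElem?_eq_getElem hkmod, List.getD]
      · rw [List.getElem?_append_right (by rw [hflat]; omega : (List.flatten (List.replicate q.toNat tmpl)).length ≤ k)]
        rw [hflat]
        have hkr : k - 15 * q.toNat < r.toNat := by omega
        rw [List.getElem?_take_of_lt hkr]
        have hke : k % 15 = k - 15 * q.toNat := by omega
        rw [hke]
        simp [List.getElem?_eq_getElem (show k - 15 * q.toNat < tmpl.length by omega), List.getD]
    · -- both none
      rw [List.getElem?_eq_none (l := List.map _ _) (by simpa using Nat.not_lt.mp hkn)]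
      rw [List.getElem?_eq_none]
      simp only [List.length_append, List.length_flatten, List.length_take, hlen]
      simp [List.sum_replicate, hlen]
      omega
  · rw [if_neg hc]
    rw [PySem.List.pyRange_one_eq_nil (by omega)]
    simp
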